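/-
  THE CONTRACTS OF libm (c/libm.c; design/CONTRACTS.md entries 93, 94, 96–100, 103–107): `Spec`s over the shadow layer only.
  Ghost parameters of every Spec: `others`, `frames` — the live objects of the shadow invariant.

  FLOATING-POINT VALUES ARE OPAQUE in this proof: no Spec of this file says anything about an xmm register, in the pre or in
  the post (FP1: what the SSE steps need — the six exception masks of MXCSR set — is the convention's `abiInv`, part of every
  `AtEntry` and `Returned`). The INTEGER arguments (`two_to(edi)`, `ldexp(xmm0, edi)`, `pow_int(xmm0, edi)`,
  `sincos_quadrant(xmm0, edi)`) may have ANY value: every one of these functions returns for every value (a caller passes the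
  result of a `cvttsd2si`, an arbitrary integer to the proof), and no caller needs to know anything about a result.

  So the twelve contracts differ in ONE number, the stack frame:

      function          own frame                       callees (largest frame)        frame
      two_to            —                               —                                 0
      pow_int           —   (the only loop: `edi` halves)   —                             0
      sin_poly          —                               —                                 0
      cos_poly          —                               —                                 0
      floor             —                               —                                 0
      ldexp             push rbx, sub rsp 8 = 16        two_to (0)              16 + 8 =  24
      sincos_quadrant   push rbp, push rbx = 16         floor, sin_poly, cos_poly (0)     24
      exp               sub rsp 8 = 8                   two_to, floor, ldexp (24)  8+8+24 = 40
      log               push rbx = 8                    two_to (0)               8 + 8 =  16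
      pow               sub rsp 8 = 8                   pow_int, log (16), exp (40)       56
      sin, cos          —                               sincos_quadrant (24)     8 + 24 = 32

  What they read besides their own stack: 8-byte constants of `.rodata` (`[120060H, 120208H)`) and the 16-byte sign mask at
  `120000H` (16-aligned: `xorpd`), by RIP-relative operands — inside the user region of the layout by arithmetic, no check call.
  They store to their own stack only (`writes _ := []`) and call no check routine: no `LiveIn` clause anywhere.
-/
import Vorbis.Spec.Basic
namespace Vorbis.Spec
open X86 X86.User Asan

/-- **`two_to(edi = n)`** (CONTRACTS 93): any `n`. Four instructions (`add edi, 3FFH ; shl rdi, 52 ; movq xmm0, rdi ; ret`): no memory access but the `ret`'s, no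
stack frame; the result (in xmm0) is opaque.
Nothing is written but those stack bytes; no shadow byte is written. -/
def two_to.spec (others : List Obj) (frames : List (Nat × FrameLayout)) : Spec where
  pre u :=
    ShadowPre others frames u
  post u v :=
    ShadowUntouched u.mem v.mem
  frame := 0
  writes _ := []

@[vspec] theorem two_to.spec_frame (others : List Obj) (frames : List (Nat × FrameLayout)) :
    (two_to.spec others frames).frame = 0 := id rfl

@[vspec] theorem two_to.spec_writes (others : List Obj) (frames : List (Nat × FrameLayout)) (u : State) :
    (two_to.spec others frames).writes u = [] := id rfl

/-- **`pow_int(xmm0 = x, edi = n)`** (CONTRACTS 99): any `n`. The only loop of libm (`while (n != 0) { …; n >>= 1 }`): it is counted by the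
32-bit value of `edi` alone (the measure: `edi` itself, `n >>> 1 < n` for `n ≠ 0`), so it returns for every `n`; one constant of
`.rodata` is read, nothing is stored, no stack frame; the result is opaque.
Nothing is written but those stack bytes; no shadow byte is written. -/
def pow_int.spec (others : List Obj) (frames : List (Nat × FrameLayout)) : Spec where
  pre u :=
    ShadowPre others frames u
  post u v :=
    ShadowUntouched u.mem v.mem
  frame := 0
  writes _ := []

@[vspec] theorem pow_int.spec_frame (others : List Obj) (frames : List (Nat × FrameLayout)) :
    (pow_int.spec others frames).frame = 0 := id rfl

@[vspec] theorem pow_int.spec_writes (others : List Obj) (frames : List (Nat × FrameLayout)) (u : State) :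
    (pow_int.spec others frames).writes u = [] := id rfl

/-- **`sin_poly(xmm0 = r)`** (CONTRACTS 103): straight-line SSE code (47 instructions) over constants of `.rodata`; nothing is stored, no stack
frame; the result is opaque.
Nothing is written but those stack bytes; no shadow byte is written. -/
def sin_poly.spec (others : List Obj) (frames : List (Nat × FrameLayout)) : Spec where
  pre u :=
    ShadowPre others frames u
  post u v :=
    ShadowUntouched u.mem v.mem
  frame := 0
  writes _ := []

@[vspec] theorem sin_poly.spec_frame (others : List Obj) (frames : List (Nat × FrameLayout)) :
    (sin_poly.spec others frames).frame = 0 := id rfl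

@[vspec] theorem sin_poly.spec_writes (others : List Obj) (frames : List (Nat × FrameLayout)) (u : State) :
    (sin_poly.spec others frames).writes u = [] := id rfl

/-- **`cos_poly(xmm0 = r)`** (CONTRACTS 104): straight-line SSE code (46 instructions) over constants of `.rodata`; nothing is stored, no stack
frame; the result is opaque.
Nothing is written but those stack bytes; no shadow byte is written. -/
def cos_poly.spec (others : List Obj) (frames : List (Nat × FrameLayout)) : Spec where
  pre u :=
    ShadowPre others frames u
  post u v :=
    ShadowUntouched u.mem v.mem
  frame := 0
  writes _ := []

@[vspec] theorem cos_poly.spec_frame (others : List Obj) (frames : List (Nat × FrameLayout)) :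
    (cos_poly.spec others frames).frame = 0 := id rfl

@[vspec] theorem cos_poly.spec_writes (others : List Obj) (frames : List (Nat × FrameLayout)) (u : State) :
    (cos_poly.spec others frames).writes u = [] := id rfl

/-- **`floor(xmm0 = x)`** (CONTRACTS 96): three branches on float compares (every arm returns), a `cvttsd2si` whose result is only converted
back; two constants of `.rodata` are read, nothing is stored, no stack frame; the result is opaque.
Nothing is written but those stack bytes; no shadow byte is written. -/
def floor.spec (others : List Obj) (frames : List (Nat × FrameLayout)) : Spec where
  pre u :=
    ShadowPre others frames u
  post u v :=
    ShadowUntouched u.mem v.mem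
  frame := 0
  writes _ := []

@[vspec] theorem floor.spec_frame (others : List Obj) (frames : List (Nat × FrameLayout)) :
    (floor.spec others frames).frame = 0 := id rfl

@[vspec] theorem floor.spec_writes (others : List Obj) (frames : List (Nat × FrameLayout)) (u : State) :
    (floor.spec others frames).writes u = [] := id rfl

/-- **`ldexp(xmm0 = x, edi = n)`** (CONTRACTS 94): any `n` (no loop: at most three multiplications, selected by signed comparisons of `n`). Its 24
bytes of stack: `push rbx`, `sub rsp, 8` (the spill of `x`), the return address of its calls of `two_to` (frame 0). The result
is opaque.
Nothing is written but those stack bytes; no shadow byte is written. -/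
def ldexp.spec (others : List Obj) (frames : List (Nat × FrameLayout)) : Spec where
  pre u :=
    ShadowPre others frames u
  post u v :=
    ShadowUntouched u.mem v.mem
  frame := 24
  writes _ := []

@[vspec] theorem ldexp.spec_frame (others : List Obj) (frames : List (Nat × FrameLayout)) :
    (ldexp.spec others frames).frame = 24 := id rfl

@[vspec] theorem ldexp.spec_writes (others : List Obj) (frames : List (Nat × FrameLayout)) (u : State) :
    (ldexp.spec others frames).writes u = [] := id rfl

/-- **`sincos_quadrant(xmm0 = x, edi = shift)`** (CONTRACTS 105): any `shift`. The quadrant `((int) k + shift) & 3` is one of 0, 1, 2, 3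
whatever the `cvttsd2si` gave: three `je` and the fall-through, each arm calls one of `sin_poly`, `cos_poly` and returns. Its
24 bytes of stack: `push rbp`, `push rbx`, the return address of its calls (`floor`, `sin_poly`, `cos_poly`: frame 0). The result
is opaque.
Nothing is written but those stack bytes; no shadow byte is written. -/
def sincos_quadrant.spec (others : List Obj) (frames : List (Nat × FrameLayout)) : Spec where
  pre u :=
    ShadowPre others frames u
  post u v :=
    ShadowUntouched u.mem v.mem
  frame := 24
  writes _ := []

@[vspec] theorem sincos_quadrant.spec_frame (others : List Obj) (frames : List (Nat × FrameLayout)) :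
    (sincos_quadrant.spec others frames).frame = 24 := id rfl

@[vspec] theorem sincos_quadrant.spec_writes (others : List Obj) (frames : List (Nat × FrameLayout)) (u : State) :
    (sincos_quadrant.spec others frames).writes u = [] := id rfl

/-- **`exp(xmm0 = x)`** (CONTRACTS 97): branches on float compares; `n = (int) k` (any value to the proof) goes to `ldexp`, which takes any `n`. Its 40
bytes of stack: `sub rsp, 8` (the spill of `x`), the return address of its calls, the largest callee frame (`ldexp`: 24;
`two_to`, `floor`: 0). The result is opaque.
Nothing is written but those stack bytes; no shadow byte is written. -/
def exp.spec (others : List Obj) (frames : List (Nat × FrameLayout)) : Spec where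
  pre u :=
    ShadowPre others frames u
  post u v :=
    ShadowUntouched u.mem v.mem
  frame := 40
  writes _ := []

@[vspec] theorem exp.spec_frame (others : List Obj) (frames : List (Nat × FrameLayout)) :
    (exp.spec others frames).frame = 40 := id rfl

@[vspec] theorem exp.spec_writes (others : List Obj) (frames : List (Nat × FrameLayout)) (u : State) :
    (exp.spec others frames).writes u = [] := id rfl

/-- **`log(xmm0 = x)`** (CONTRACTS 98): branches on float compares and on the bits of `x` (integer comparisons of rbx); the exponent is extracted with
integer operations. Its 16 bytes of stack: `push rbx`, the return address of its calls of `two_to` (frame 0). The result is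
opaque.
Nothing is written but those stack bytes; no shadow byte is written. -/
def log.spec (others : List Obj) (frames : List (Nat × FrameLayout)) : Spec where
  pre u :=
    ShadowPre others frames u
  post u v :=
    ShadowUntouched u.mem v.mem
  frame := 16
  writes _ := []

@[vspec] theorem log.spec_frame (others : List Obj) (frames : List (Nat × FrameLayout)) :
    (log.spec others frames).frame = 16 := id rfl

@[vspec] theorem log.spec_writes (others : List Obj) (frames : List (Nat × FrameLayout)) (u : State) :
    (log.spec others frames).writes u = [] := id rfl

/-- **`pow(xmm0 = x, xmm1 = y)`** (CONTRACTS 100): branches on float compares; `n = (unsigned) (int) y` (any 32-bit value to the proof) goes to `pow_int`,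
which takes any `n`. Its 56 bytes of stack: `sub rsp, 8` (the spill of `y`), the return address of its calls, the largest callee
frame (`exp`: 40; `log`: 16; `pow_int`: 0). The result is opaque.
Nothing is written but those stack bytes; no shadow byte is written. -/
def pow.spec (others : List Obj) (frames : List (Nat × FrameLayout)) : Spec where
  pre u :=
    ShadowPre others frames u
  post u v :=
    ShadowUntouched u.mem v.mem
  frame := 56
  writes _ := []

@[vspec] theorem pow.spec_frame (others : List Obj) (frames : List (Nat × FrameLayout)) :
    (pow.spec others frames).frame = 56 := id rfl

@[vspec] theorem pow.spec_writes (others : List Obj) (frames : List (Nat × FrameLayout)) (u : State) :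
    (pow.spec others frames).writes u = [] := id rfl

/-- **`sin(xmm0 = x)`** (CONTRACTS 106): `mov edi, 0 ; call sincos_quadrant ; ret`. Its 32 bytes of stack: the return address of the call and
`sincos_quadrant`'s 24. The result is opaque.
Nothing is written but those stack bytes; no shadow byte is written. -/
def sin.spec (others : List Obj) (frames : List (Nat × FrameLayout)) : Spec where
  pre u :=
    ShadowPre others frames u
  post u v :=
    ShadowUntouched u.mem v.mem
  frame := 32
  writes _ := []

@[vspec] theorem sin.spec_frame (others : List Obj) (frames : List (Nat × FrameLayout)) :
    (sin.spec others frames).frame = 32 := id rfl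

@[vspec] theorem sin.spec_writes (others : List Obj) (frames : List (Nat × FrameLayout)) (u : State) :
    (sin.spec others frames).writes u = [] := id rfl

/-- **`cos(xmm0 = x)`** (CONTRACTS 107): `mov edi, 1 ; call sincos_quadrant ; ret`. Its 32 bytes of stack: the return address of the call and
`sincos_quadrant`'s 24. The result is opaque.
Nothing is written but those stack bytes; no shadow byte is written. -/
def cos.spec (others : List Obj) (frames : List (Nat × FrameLayout)) : Spec where
  pre u :=
    ShadowPre others frames u
  post u v :=
    ShadowUntouched u.mem v.mem
  frame := 32
  writes _ := []

@[vspec] theorem cos.spec_frame (others : List Obj) (frames : List (Nat × FrameLayout)) :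
    (cos.spec others frames).frame = 32 := id rfl

@[vspec] theorem cos.spec_writes (others : List Obj) (frames : List (Nat × FrameLayout)) (u : State) :
    (cos.spec others frames).writes u = [] := id rfl

end Vorbis.Spec
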